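-- pv_equiv track=rewrite | github.com/schlogl2017/BioinfoCourse | genome_kmers.py | kmer_positions
-- ===== SOURCE A (Python) =====
-- def get_strand_complement(sequence):
--     """Returns the complement strand of the genome."""
--     seq = sequence.upper()
--     change = str.maketrans('ACGT', 'TGCA')
--     return seq.translate(change)
--
-- def get_reverse_complement(sequence):
--     """Returns the reverse complement strand of the genome."""
--     seq = sequence.upper()
--     return get_strand_complement(seq)[::-1]
--
-- def kmer_positions(sequence, k):
--     """Returns the position of all k-mers and it complement pair from sequence as a dictionary"""
--     seq = sequence.upper()
--     kmer_position = {}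
--     for i in range(1, len(seq) - k + 1):
--         kmer = seq[i:i + k]
--         kmer_position[kmer] = kmer_position.get(kmer, []) + [i]
--     # combine kmers with their reverse complements
--     pair_position = {}
--     for kmer, pos_lst in kmer_position.items():
--         rev_mer = get_reverse_complement(kmer)
--         if kmer < rev_mer:
--             pair_position[kmer] = sorted(pos_lst + kmer_position.get(rev_mer, []))
--         elif rev_mer < kmer:
--             pair_position[rev_mer] = sorted(kmer_position.get(rev_mer, []) + pos_lst)
--         else:
--             pair_position[kmer] = pos_lst
--     return pair_position
-- ===== SOURCE B (Python) =====
-- def kmer_positions(sequence, k):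
--     """Returns the position of all k-mers and it complement pair from sequence as a dictionary"""
--     seq = sequence.upper()
--     table = str.maketrans('ACGT', 'TGCA')
--     pair_position = {}
--     for i in range(1, len(seq) - k + 1):
--         kmer = seq[i:i + k]
--         rev_mer = kmer.translate(table)[::-1]
--         key = kmer if kmer <= rev_mer else rev_mer
--         pair_position.setdefault(key, []).append(i)
--     return pair_position
-- ===== Notes on version B (the rewrite author's own statement) =====
-- stated objective: alternative
-- what changed: B is a single pass over the sequence: for each position it computes the canonical key (lexicographic min of the k-mer and its reverse complement) and appends the position to that key's list, which yields the merged sorted lists and A's key order directly; A instead builds a full kmer->positions dict by list copy-concatenation and then runs a second pass that pairs each kmer with its reverse complement and sorts the concatenated lists. Intended as faster (no per-occurrence list copies, no sorting pass); a timing run measured only 1.33x at its largest finished size, so no speed is claimed.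
import Mathlib
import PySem

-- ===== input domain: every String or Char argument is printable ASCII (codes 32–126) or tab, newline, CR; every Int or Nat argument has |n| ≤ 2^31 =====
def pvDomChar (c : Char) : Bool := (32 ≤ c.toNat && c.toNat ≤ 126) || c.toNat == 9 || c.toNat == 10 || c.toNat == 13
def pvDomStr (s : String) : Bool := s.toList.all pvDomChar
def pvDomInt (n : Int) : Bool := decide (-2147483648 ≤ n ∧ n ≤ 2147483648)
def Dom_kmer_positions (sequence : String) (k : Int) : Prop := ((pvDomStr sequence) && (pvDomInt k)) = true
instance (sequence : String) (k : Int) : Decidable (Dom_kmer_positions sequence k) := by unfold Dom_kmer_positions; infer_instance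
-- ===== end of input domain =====

-- B replaces A's two staged dict passes (group positions by k-mer with list copy-concatenation,
-- then pair each k-mer with its reverse complement and sort the concatenated lists) by a single
-- pass that files each position directly under the canonical key min(kmer, reverse complement).

-- ===== PORT A =====
-- str.maketrans('ACGT', 'TGCA') + str.translate: a 1-char-to-1-char table, exact as a per-character map
def pvTrans (c : Char) : Char :=
  if c = 'A' then 'T' else if c = 'C' then 'G' else if c = 'G' then 'C' else if c = 'T' then 'A' else c

def get_strand_complement (sequence : String) : String :=
  String.ofList ((PySem.Str.upper sequence).toList.map pvTrans)

-- seq[::-1] is reverse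
def get_reverse_complement (sequence : String) : String :=
  String.ofList (get_strand_complement (PySem.Str.upper sequence)).toList.reverse

def kmer_positions (sequence : String) (k : Int) : List (String × List Int) :=
  let seq := PySem.Str.upper sequence
  let kmer_position : PySem.Dict String (List Int) :=
    (PySem.List.pyRange 1 (PySem.Str.len seq - k + 1) 1).foldl
      (fun d i =>
        let kmer := PySem.Str.slice seq (some i) (some (i + k))
        d.insert kmer (d.getD kmer [] ++ [i]))
      PySem.Dict.empty
  let pair_position : PySem.Dict String (List Int) :=
    kmer_position.items.foldl
      (fun pair p =>
        let rev_mer := get_reverse_complement p.1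
        if p.1 < rev_mer then
          pair.insert p.1 (PySem.List.sorted (p.2 ++ kmer_position.getD rev_mer []) (fun x => x))
        else if rev_mer < p.1 then
          pair.insert rev_mer (PySem.List.sorted (kmer_position.getD rev_mer [] ++ p.2) (fun x => x))
        else
          pair.insert p.1 p.2)
      PySem.Dict.empty
  pair_position.items

-- ===== PORT B =====
-- one pass: positions are filed directly under key = min(kmer, reverse complement of kmer)
def kmer_positions_alt (sequence : String) (k : Int) : List (String × List Int) :=
  let seq := PySem.Str.upper sequence
  let pair_position : PySem.Dict String (List Int) :=
    (PySem.List.pyRange 1 (PySem.Str.len seq - k + 1) 1).foldl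
      (fun d i =>
        let kmer := PySem.Str.slice seq (some i) (some (i + k))
        let rev_mer := String.ofList (kmer.toList.map pvTrans).reverse
        let key := if kmer ≤ rev_mer then kmer else rev_mer
        d.modify key [] (fun l => l ++ [i]))
      PySem.Dict.empty
  pair_position.items

-- ===== PRECONDITION & SPEC =====
def Spec_kmer_positions (sequence : String) (k : Int) (out : List (String × List Int)) : Prop := out = kmer_positions_alt sequence k
instance (sequence : String) (k : Int) (out : List (String × List Int)) : Decidable (Spec_kmer_positions sequence k out) := by unfold Spec_kmer_positions; infer_instance

-- ===== CLAIM (what is proved, stated in full; the proofs are below) =====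
def Claim_equal_kmer_positions : Prop := ∀ (sequence : String) (k : Int), Dom_kmer_positions sequence k → Spec_kmer_positions sequence k (kmer_positions sequence k)

-- ===== LEMMAS AND PROOFS =====

-- proof-side names: the k-mer at position i, B's reverse complement, the canonical key,
-- upper-stability, and the shared grouping fold
def pvKm (seq : String) (k : Int) (i : Int) : String := PySem.Str.slice seq (some i) (some (i + k))
def pvRC (s : String) : String := String.ofList (s.toList.map pvTrans).reverse
def pvG (s : String) : String := if s ≤ pvRC s then s else pvRC s
def pvUS (s : String) : Prop := ∀ c ∈ s.toList, PySem.Chars.upperChar c = c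
def pvGroup (key : Int → String) (l : List Int) : PySem.Dict String (List Int) :=
  l.foldl (fun d i => d.modify (key i) [] (fun t => t ++ [i])) PySem.Dict.empty
def pvF (km : Int → String) (l : List Int) (c : String) : List Int :=
  l.filter (fun i => km i == c)
def pvV (km : Int → String) (l : List Int) (c : String) : List Int :=
  if pvRC c = c then pvF km l c
  else PySem.List.sorted (pvF km l c ++ pvF km l (pvRC c)) (fun x => x)

lemma pv_upperChar_idem (c : Char) :
    PySem.Chars.upperChar (PySem.Chars.upperChar c) = PySem.Chars.upperChar c := by
  unfold PySem.Chars.upperChar PySem.Chars.islower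
  by_cases h1 : 'a' ≤ c
  · by_cases h2 : c ≤ 'z'
    · simp only [h1, h2, decide_true, Bool.and_self, if_true]
      have hv1 : 97 ≤ c.toNat := h1
      have hv2 : c.toNat ≤ 122 := h2
      have hna : ¬ ('a' ≤ Char.ofNat (c.toNat - 32)) := by
        intro hle
        have h3 : (Char.ofNat (c.toNat - 32)).toNat = c.toNat - 32 := by
          rw [Char.toNat_ofNat, if_pos (Or.inl (by omega))]
        have : 97 ≤ (Char.ofNat (c.toNat - 32)).toNat := hle
        omega
      simp [hna]
    · simp [h2]
  · simp [h1]

lemma pv_trans_trans (c : Char) (_hc : PySem.Chars.upperChar c = c) : pvTrans (pvTrans c) = c := by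
  by_cases hA : c = 'A'; · rw [hA]; decide
  by_cases hC : c = 'C'; · rw [hC]; decide
  by_cases hG : c = 'G'; · rw [hG]; decide
  by_cases hT : c = 'T'; · rw [hT]; decide
  have ht : pvTrans c = c := by unfold pvTrans; simp [hA, hC, hG, hT]
  rw [ht, ht]

-- the complement of an upper-stable char is upper-stable
lemma pv_upperChar_trans (c : Char) (hc : PySem.Chars.upperChar c = c) :
    PySem.Chars.upperChar (pvTrans c) = pvTrans c := by
  by_cases hA : c = 'A'; · rw [hA]; decide
  by_cases hC : c = 'C'; · rw [hC]; decide
  by_cases hG : c = 'G'; · rw [hG]; decide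
  by_cases hT : c = 'T'; · rw [hT]; decide
  have ht : pvTrans c = c := by unfold pvTrans; simp [hA, hC, hG, hT]
  rw [ht, hc]

lemma pvRC_toList (s : String) : (pvRC s).toList = (s.toList.map pvTrans).reverse := by
  simp [pvRC]

-- A's helper on an upper-stable string is B's translate-and-reverse
lemma pv_rcA_eq (s : String) (hs : pvUS s) : get_reverse_complement s = pvRC s := by
  apply String.toList_inj.mp
  unfold get_reverse_complement get_strand_complement
  rw [pvRC_toList]
  simp only [String.toList_ofList, PySem.Str.toList_upper, PySem.Chars.upper, List.map_map]
  congr 1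
  apply List.map_congr_left
  intro c hc
  simp [Function.comp, hs c hc]

lemma pvUS_RC (s : String) (hs : pvUS s) : pvUS (pvRC s) := by
  intro c hc
  rw [pvRC_toList, List.mem_reverse, List.mem_map] at hc
  obtain ⟨a, ha, rfl⟩ := hc
  exact pv_upperChar_trans a (hs a ha)

lemma pvRC_RC (s : String) (hs : pvUS s) : pvRC (pvRC s) = s := by
  apply String.toList_inj.mp
  rw [pvRC_toList, pvRC_toList, List.map_reverse, List.reverse_reverse, List.map_map]
  conv_rhs => rw [← List.map_id s.toList]
  apply List.map_congr_left
  intro c hc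
  simpa [Function.comp] using pv_trans_trans c (hs c hc)

lemma pvG_canon (s : String) (hs : pvUS s) : pvG s ≤ pvRC (pvG s) := by
  unfold pvG
  split_ifs with h
  · exact h
  · rw [pvRC_RC s hs]
    exact le_of_not_ge h

lemma pvUS_G (s : String) (hs : pvUS s) : pvUS (pvG s) := by
  unfold pvG
  split_ifs
  · exact hs
  · exact pvUS_RC s hs

lemma pvG_eq_iff (x c : String) (hx : pvUS x) (hc : c ≤ pvRC c) (hcs : pvUS c) :
    pvG x = c ↔ x = c ∨ x = pvRC c := by
  constructor
  · intro h
    unfold pvG at h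
    split_ifs at h with h1
    · exact Or.inl h
    · right
      rw [← h, pvRC_RC x hx]
  · rintro (rfl | rfl)
    · unfold pvG
      rw [if_pos hc]
    · unfold pvG
      rw [pvRC_RC c hcs]
      split_ifs with h1
      · exact le_antisymm h1 hc
      · rfl

-- slices of an upper-stable string are upper-stable
lemma pv_slice_stable (seq : String) (hseq : pvUS seq) (a b : Option Int) :
    pvUS (PySem.Str.slice seq a b) := by
  intro c hc
  rw [PySem.Str.toList_slice, PySem.Chars.slice_eq_listSlice] at hc
  exact hseq c (PySem.List.mem_of_mem_slice _ a b hc)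

-- characterization of the grouping fold: lookups and items
lemma pvGroup_getD (key : Int → String) (l : List Int) (c : String) :
    (pvGroup key l).getD c [] = l.filter (fun i => key i == c) := by
  have h2 : pvGroup key l =
      (l.map (fun i => (key i, i))).foldl
        (fun d p => d.modify p.1 [] (fun t => t ++ [p.2])) PySem.Dict.empty := by
    rw [List.foldl_map]
    rfl
  rw [h2, PySem.Dict.getD_foldl_modify_append]
  simp [PySem.Dict.getD_empty, List.filter_map, Function.comp_def, List.map_map]

lemma pvGroup_nodup (key : Int → String) (l : List Int) : (pvGroup key l).keys.Nodup :=
  PySem.Dict.nodup_keys_foldl_modify_key l key [] (fun _ i => fun t => t ++ [i])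
    PySem.Dict.empty PySem.Dict.nodup_keys_empty

lemma pvGroup_keys (key : Int → String) (l : List Int) :
    (pvGroup key l).keys = PySem.Set.ofList (l.map key) := by
  unfold pvGroup
  rw [PySem.Dict.keys_foldl_modify_key l key [] (fun _ i => fun t => t ++ [i])]
  rw [PySem.Dict.keys_empty, PySem.Set.update_nil_left]

lemma pvGroup_items (key : Int → String) (l : List Int) :
    (pvGroup key l).items
      = (PySem.Set.ofList (l.map key)).map (fun c => (c, l.filter (fun i => key i == c))) := by
  rw [PySem.Dict.items_eq_map_keys _ (pvGroup_nodup key l) [], pvGroup_keys]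
  exact List.map_congr_left (fun c _ => by rw [pvGroup_getD])

-- ordered dedup commutes with mapping before or after
lemma pv_ofList_map {α β : Type} [BEq α] [LawfulBEq α] [BEq β] [LawfulBEq β]
    (g : α → β) (s : List α) :
    PySem.Set.ofList ((PySem.Set.ofList s).map g) = PySem.Set.ofList (s.map g) := by
  induction s using List.reverseRecOn with
  | nil => rfl
  | append_singleton xs x ih =>
    rw [PySem.Set.ofList_append_singleton, List.map_append, List.map_singleton,
      PySem.Set.ofList_append_singleton]
    by_cases hx : x ∈ xs
    · have h1 : x ∈ PySem.Set.ofList xs := (PySem.Set.mem_ofList xs x).mpr hx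
      have h2 : g x ∈ PySem.Set.ofList (xs.map g) :=
        (PySem.Set.mem_ofList (xs.map g) (g x)).mpr (List.mem_map_of_mem hx)
      rw [PySem.Set.add_of_mem h1, ih, PySem.Set.add_of_mem h2]
    · have h1 : x ∉ PySem.Set.ofList xs := fun h => hx ((PySem.Set.mem_ofList xs x).mp h)
      rw [PySem.Set.add_of_not_mem h1, List.map_append, List.map_singleton,
        PySem.Set.ofList_append_singleton, ih]

-- concatenating two filters by disjoint tests is a permutation of the filter by their disjunction
lemma pv_filter_union_perm (p q : Int → Bool) (l : List Int) (h : ∀ i, p i = true → q i = false) :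
    (l.filter p ++ l.filter q).Perm (l.filter (fun i => p i || q i)) := by
  induction l with
  | nil => simp
  | cons x xs ih =>
    by_cases hp : p x = true
    · simp only [List.filter_cons, hp, h x hp, Bool.true_or, if_true, Bool.false_eq_true, if_false,
        List.cons_append]
      exact ih.cons x
    · by_cases hq : q x = true
      · simp only [List.filter_cons, hp, hq, Bool.false_eq_true, if_false, Bool.false_or, if_true]
        exact List.perm_middle.trans (ih.cons x)
      · simp only [List.filter_cons, hp, hq, Bool.false_eq_true, if_false, Bool.false_or]
        exact ih

-- inserting a value the dict already holds at that key leaves the dict unchanged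
lemma pv_insert_mem_self {d : PySem.Dict String (List Int)} {κ : String} {v : List Int}
    (hnd : d.keys.Nodup) (h : (κ, v) ∈ d.items) : d.insert κ v = d := by
  have hk : κ ∈ d.keys := PySem.Dict.mem_keys_of_mem_items d h
  have hc : d.contains κ = true := (PySem.Dict.contains_iff_mem_keys d κ).mpr hk
  have hg : d.get? κ = some v := PySem.Dict.get?_of_mem_items d h hnd
  apply PySem.Dict.ext
  rw [PySem.Dict.items_insert_of_contains d v hc]
  conv_rhs => rw [← List.map_id d.items]
  apply List.map_congr_left
  intro p hp
  by_cases hb : p.1 == κ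
  · have hpk : p.1 = κ := eq_of_beq hb
    have hg2 : d.get? p.1 = some p.2 := PySem.Dict.get?_of_mem_items d (by simpa using hp) hnd
    rw [hpk] at hg2
    rw [hg] at hg2
    simp only [hb, if_true, id_eq]
    obtain rfl : v = p.2 := Option.some_injective _ hg2
    rw [← hpk]
  · simp [hb]

lemma pv_contains_exists {d : PySem.Dict String (List Int)} {κ : String}
    (hc : d.contains κ = true) : ∃ v, (κ, v) ∈ d.items := by
  have hk : κ ∈ d.keys := (PySem.Dict.contains_iff_mem_keys d κ).mp hc
  simp only [PySem.Dict.keys, List.mem_map] at hk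
  obtain ⟨p, hp, hpk⟩ := hk
  exact ⟨p.2, by rw [← hpk]; exact hp⟩

-- a fold of inserts whose key and value both factor through g' produces each canonical key once,
-- in first-appearance order
lemma pv_foldl_insert_items (V : String → List Int) (g' : String → String) (K : List String) :
    ∀ (pair : PySem.Dict String (List Int)), pair.keys.Nodup →
    (∀ q ∈ pair.items, q.2 = V q.1) →
    (K.foldl (fun d κ => d.insert (g' κ) (V (g' κ))) pair).items
      = pair.items
        ++ (((PySem.Set.ofList (K.map g')).filter (fun c => !pair.contains c)).map
              (fun c => (c, V c))) := by
  induction K with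
  | nil => intro pair _ _; simp
  | cons κ K' ih =>
    intro pair hnd hinv
    simp only [List.foldl_cons, List.map_cons, PySem.Set.ofList_cons]
    by_cases hc : pair.contains (g' κ) = true
    · obtain ⟨v, hv⟩ := pv_contains_exists hc
      have hv2 : v = V (g' κ) := hinv _ hv
      rw [show pair.insert (g' κ) (V (g' κ)) = pair from hv2 ▸ pv_insert_mem_self hnd hv]
      rw [ih pair hnd hinv]
      congr 1
      simp only [List.filter_cons, hc, Bool.not_true, Bool.false_eq_true, if_false,
        PySem.Set.discard, List.filter_filter]
      congr 1
      apply List.filter_congr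
      intro y _
      by_cases hy : y = g' κ
      · subst hy; simp [hc]
      · simp [hy]
    · rw [Bool.not_eq_true] at hc
      have hitems : (pair.insert (g' κ) (V (g' κ))).items = pair.items ++ [(g' κ, V (g' κ))] :=
        PySem.Dict.items_insert_of_not_contains pair (V (g' κ)) hc
      have hnd' : (pair.insert (g' κ) (V (g' κ))).keys.Nodup :=
        PySem.Dict.nodup_keys_insert _ _ _ hnd
      have hinv' : ∀ q ∈ (pair.insert (g' κ) (V (g' κ))).items, q.2 = V q.1 := by
        intro q hq
        rcases (PySem.Dict.mem_items_insert _ _ _ q).mp hq with h | ⟨h, _⟩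
        · rw [h]
        · exact hinv q h
      rw [ih _ hnd' hinv', hitems]
      simp only [List.filter_cons, hc, Bool.not_false, if_pos, List.map_cons, List.append_assoc,
        List.cons_append, List.nil_append]
      congr 2
      simp only [PySem.Set.discard, List.filter_filter]
      congr 1
      apply List.filter_congr
      intro y _
      rw [PySem.Dict.contains_insert]
      rw [Bool.not_or]
      exact Bool.and_comm _ _

-- the central equation: A's two passes over the grouped dict equal B's single grouped pass
set_option maxHeartbeats 2000000 in
lemma pv_main (seq : String) (k : Int) (hseq : pvUS seq) :
    ((pvGroup (pvKm seq k) (PySem.List.pyRange 1 (PySem.Str.len seq - k + 1) 1)).items.foldl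
      (fun pair p =>
        let rev_mer := get_reverse_complement p.1
        if p.1 < rev_mer then
          pair.insert p.1 (PySem.List.sorted
            (p.2 ++ (pvGroup (pvKm seq k) (PySem.List.pyRange 1 (PySem.Str.len seq - k + 1) 1)).getD rev_mer [])
            (fun x => x))
        else if rev_mer < p.1 then
          pair.insert rev_mer (PySem.List.sorted
            ((pvGroup (pvKm seq k) (PySem.List.pyRange 1 (PySem.Str.len seq - k + 1) 1)).getD rev_mer [] ++ p.2)
            (fun x => x))
        else
          pair.insert p.1 p.2)
      PySem.Dict.empty).items
    = (pvGroup (fun i => pvG (pvKm seq k i))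
        (PySem.List.pyRange 1 (PySem.Str.len seq - k + 1) 1)).items := by
  have hstab : ∀ i : Int, pvUS (pvKm seq k i) := fun i => pv_slice_stable seq hseq _ _
  set l := PySem.List.pyRange 1 (PySem.Str.len seq - k + 1) 1 with hl
  -- rewrite the base list of A's second pass
  rw [pvGroup_items (pvKm seq k) l, List.foldl_map]
  -- replace A's step by the canonical insert, for keys of the grouped dict
  rw [PySem.List.foldl_congr_mem _ _
      (fun pair κ => pair.insert (pvG κ) (pvV (pvKm seq k) l (pvG κ))) _ ?_]
  · -- both sides are the canonical items list
    rw [pv_foldl_insert_items (pvV (pvKm seq k) l) pvG _ PySem.Dict.empty PySem.Dict.nodup_keys_empty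
        (by intro q hq; simp [PySem.Dict.empty] at hq)]
    rw [pvGroup_items (fun i => pvG (pvKm seq k i)) l]
    have hkeys : PySem.Set.ofList ((PySem.Set.ofList (l.map (pvKm seq k))).map pvG)
        = PySem.Set.ofList (l.map (fun i => pvG (pvKm seq k i))) := by
      rw [pv_ofList_map, List.map_map]
      rfl
    rw [show (PySem.Dict.empty : PySem.Dict String (List Int)).items = [] from rfl,
      List.nil_append,
      show (fun c => !(PySem.Dict.empty : PySem.Dict String (List Int)).contains c)
        = (fun _ => true) from funext (fun c => by simp [PySem.Dict.contains_empty]),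
      List.filter_true, hkeys]
    apply List.map_congr_left
    intro c hcmem
    rw [(PySem.Set.mem_ofList _ _)] at hcmem
    obtain ⟨i₀, _, rfl⟩ := List.mem_map.mp hcmem
    set c := pvG (pvKm seq k i₀) with hcdef
    have hcs : pvUS c := pvUS_G _ (hstab i₀)
    have hcanon : c ≤ pvRC c := pvG_canon _ (hstab i₀)
    have hfe : l.filter (fun i => pvG (pvKm seq k i) == c)
        = l.filter (fun i => (pvKm seq k i == c) || (pvKm seq k i == pvRC c)) := by
      apply List.filter_congr
      intro i _
      rw [Bool.eq_iff_iff]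
      simp only [beq_iff_eq, Bool.or_eq_true]
      exact pvG_eq_iff (pvKm seq k i) c (hstab i) hcanon hcs
    rw [hfe]
    congr 1
    by_cases hpal : pvRC c = c
    · unfold pvV pvF
      rw [if_pos hpal, hpal]
      apply List.filter_congr
      intro i _
      simp
    · unfold pvV pvF
      rw [if_neg hpal]
      apply PySem.List.sorted_id_eq_of_perm_of_pairwise
      · refine (pv_filter_union_perm _ _ l ?_).symm
        intro i hp
        rw [beq_iff_eq] at hp
        by_cases hq : pvKm seq k i == pvRC c
        · rw [beq_iff_eq] at hq
          exact absurd (hq.symm.trans hp) hpal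
        · simpa using hq
      · exact (List.Pairwise.filter _ (PySem.List.pairwise_lt_pyRange_one 1 _)).imp le_of_lt
  · -- the pointwise step replacement, valid on members of the grouped dict
    intro pair κ hκ
    rw [(PySem.Set.mem_ofList _ _)] at hκ
    obtain ⟨i₁, _, rfl⟩ := List.mem_map.mp hκ
    set κ := pvKm seq k i₁ with hκdef
    have hκs : pvUS κ := hstab i₁
    have hrc : get_reverse_complement κ = pvRC κ := pv_rcA_eq κ hκs
    simp only [hrc, pvGroup_getD]
    rcases lt_trichotomy κ (pvRC κ) with h1 | h1 | h1
    · rw [if_pos h1]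
      have hgk : pvG κ = κ := by unfold pvG; rw [if_pos (le_of_lt h1)]
      have hv : pvV (pvKm seq k) l κ
          = PySem.List.sorted (pvF (pvKm seq k) l κ ++ pvF (pvKm seq k) l (pvRC κ)) (fun x => x) := by
        unfold pvV
        rw [if_neg (ne_of_gt h1)]
      rw [hgk, hv]
      rfl
    · rw [← h1]
      simp only [lt_irrefl, if_false]
      have hgk : pvG κ = κ := by unfold pvG; rw [if_pos (le_of_eq h1)]
      have hv : pvV (pvKm seq k) l κ = pvF (pvKm seq k) l κ := by unfold pvV; rw [if_pos h1.symm]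
      rw [hgk, hv]
      rfl
    · rw [if_neg (not_lt_of_gt h1), if_pos h1]
      have hgk : pvG κ = pvRC κ := by unfold pvG; rw [if_neg (not_le_of_gt h1)]
      have hv : pvV (pvKm seq k) l (pvRC κ)
          = PySem.List.sorted (pvF (pvKm seq k) l (pvRC κ) ++ pvF (pvKm seq k) l κ) (fun x => x) := by
        unfold pvV
        rw [pvRC_RC κ hκs, if_neg (ne_of_gt h1)]
      rw [hgk, hv]
      rfl

-- ===== VERDICT (by name: the statement is the Claim_ definition above) =====
theorem kmer_positions_spec : Claim_equal_kmer_positions := by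
  intro sequence k _
  unfold Spec_kmer_positions
  have hseq : pvUS (PySem.Str.upper sequence) := by
    intro c hc
    rw [PySem.Str.toList_upper, PySem.Chars.upper, List.mem_map] at hc
    obtain ⟨d, _, rfl⟩ := hc
    exact pv_upperChar_idem d
  exact pv_main (PySem.Str.upper sequence) k hseq
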